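-- pv_equiv track=rewrite | github.com/FedeRobledo/Primer_Parcial_Progra1_Robledo_Federico | funciones/funciones.py | transformar_matriz
-- ===== SOURCE A (Python) =====
-- def transformar_matriz(matriz_concesionaria: list[list]) -> list[list]:
--     """_summary_ Devuelve la matriz ordenada de forma tal de ser compatible con la funcion mostrar_matriz_texto_tabla
--
--     Args:
--         matriz_concesionaria (list[list]): _description_ Matriz original
--
--     Returns:
--         list[list]: _description_ Matriz transformada para poder mostrarse
--     """
--
--     matriz_ordenada = []
--     cantidad_filas = len(matriz_concesionaria[0])
--     cantidad_columnas = len(matriz_concesionaria)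
--
--     for indice_fila in range(cantidad_filas):
--         matriz_ordenada.append([])
--         for indice_columna in range(cantidad_columnas + 1):
--             if indice_columna == 0:
--                 columna = indice_columna + indice_fila
--             else:
--                 columna = matriz_concesionaria[indice_columna - 1][indice_fila]
--
--             matriz_ordenada[indice_fila].append(columna)
--
--     return matriz_ordenada
-- ===== SOURCE B (Python) =====
-- def transformar_matriz(matriz_concesionaria: list[list]) -> list[list]:
--     resultado = [[i] for i in range(len(matriz_concesionaria[0]))]
--     for fila in matriz_concesionaria:
--         for destino, valor in zip(resultado, fila):
--             destino.append(valor)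
--     return resultado
-- ===== Notes on version B (the rewrite author's own statement) =====
-- stated objective: alternative
-- what changed: B grows all output rows simultaneously in a single pass over the input rows (seed the index column, then zip each input row against the partial result and append elementwise), instead of A's construction of each output row by indexing into every input row; this removes the per-cell double subscript matriz[col][fila].
import Mathlib
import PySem

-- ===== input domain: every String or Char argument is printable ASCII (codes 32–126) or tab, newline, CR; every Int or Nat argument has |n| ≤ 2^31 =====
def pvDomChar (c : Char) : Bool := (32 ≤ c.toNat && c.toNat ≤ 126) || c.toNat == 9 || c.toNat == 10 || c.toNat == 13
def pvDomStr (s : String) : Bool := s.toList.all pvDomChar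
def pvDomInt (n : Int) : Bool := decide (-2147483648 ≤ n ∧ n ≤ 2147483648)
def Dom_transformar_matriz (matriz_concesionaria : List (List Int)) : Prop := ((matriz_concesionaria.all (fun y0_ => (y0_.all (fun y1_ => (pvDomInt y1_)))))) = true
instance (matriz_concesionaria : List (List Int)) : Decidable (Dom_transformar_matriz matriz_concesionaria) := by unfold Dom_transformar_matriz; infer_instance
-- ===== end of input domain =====

-- B builds the whole output in one pass over the INPUT rows, growing every output row at once
-- from a seeded index column, instead of A's per-output-row indexing loops (objective: alternative).
-- Neither implementation mutates its argument.

-- ===== PORT A =====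
def transformar_matriz (matriz_concesionaria : List (List Int)) : List (List Int) :=
  let cantidad_filas : Int := PySem.List.len (PySem.List.pyGetD matriz_concesionaria 0 [])
  let cantidad_columnas : Int := PySem.List.len matriz_concesionaria
  (PySem.List.pyRange 0 cantidad_filas 1).foldl (fun acc indice_fila =>
    acc ++ [(PySem.List.pyRange 0 (cantidad_columnas + 1) 1).foldl (fun fila indice_columna =>
      fila ++ [if indice_columna = 0 then indice_columna + indice_fila
               else PySem.List.pyGetD
                      (PySem.List.pyGetD matriz_concesionaria (indice_columna - 1) [])
                      indice_fila 0]) []]) []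

-- ===== PORT B =====
-- resultado starts as the index column [[0],[1],…]; each input row is zipped against it and
-- appended elementwise (zip truncates to the shorter side: rows of resultado beyond
-- fila.length stay unchanged, which the `++ acc.drop fila.length` models).
def transformar_matriz_alt (matriz_concesionaria : List (List Int)) : List (List Int) :=
  let resultado : List (List Int) :=
    (List.range (PySem.List.pyGetD matriz_concesionaria 0 []).length).map (fun i : Nat => [(i : Int)])
  matriz_concesionaria.foldl (fun acc fila =>
    (List.zipWith (fun destino valor => destino ++ [valor]) acc fila) ++ acc.drop fila.length)
    resultado

-- ===== PRECONDITION & SPEC =====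
-- Pre_ excludes exactly the inputs on which A raises IndexError: the empty outer list
-- (matriz[0] fails) and ragged inputs where some row is shorter than row 0.
def Pre_transformar_matriz (matriz_concesionaria : List (List Int)) : Prop :=
  matriz_concesionaria ≠ [] ∧
  ∀ row ∈ matriz_concesionaria,
    (matriz_concesionaria.headD []).length ≤ row.length
instance (matriz_concesionaria : List (List Int)) : Decidable (Pre_transformar_matriz matriz_concesionaria) := by unfold Pre_transformar_matriz; infer_instance

def pvWitness_transformar_matriz : List (List Int) := [[1, 2, 3], [4, 5, 6]]

def Spec_transformar_matriz (matriz_concesionaria : List (List Int)) (out : List (List Int)) : Prop := out = transformar_matriz_alt matriz_concesionaria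
instance (matriz_concesionaria : List (List Int)) (out : List (List Int)) : Decidable (Spec_transformar_matriz matriz_concesionaria out) := by unfold Spec_transformar_matriz; infer_instance

-- ===== CLAIM (what is proved, stated in full; the proofs are below) =====
def Claim_equal_transformar_matriz : Prop := ∀ (matriz_concesionaria : List (List Int)), Dom_transformar_matriz matriz_concesionaria → Pre_transformar_matriz matriz_concesionaria → Spec_transformar_matriz matriz_concesionaria (transformar_matriz matriz_concesionaria)

-- ===== LEMMAS AND PROOFS =====

lemma map_getD_range {α β : Type} (l : List α) (d : α) (f : α → β) :
    (List.range l.length).map (fun k => f (l.getD k d)) = l.map f := by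
  induction l with
  | nil => simp
  | cons a t ih =>
    rw [List.length_cons, List.range_succ_eq_map, List.map_cons, List.map_map]
    simp only [List.getD_cons_zero]
    rw [List.map_cons]
    exact congrArg (f a :: ·) ih

lemma head_pyGetD (m : List (List Int)) (hm : m ≠ []) :
    PySem.List.pyGetD m 0 [] = m.headD [] := by
  cases m with
  | nil => exact absurd rfl hm
  | cons r rs => simp [PySem.List.pyGetD, PySem.List.pyGet?, PySem.List.pyIdx?]

lemma a_closed (m : List (List Int)) (hm : m ≠ []) :
    transformar_matriz m =
      (List.range (m.headD []).length).map
        (fun (i : Nat) => (i : Int) :: m.map (fun r => PySem.List.pyGetD r (i : Int) 0)) := by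
  unfold transformar_matriz
  rw [head_pyGetD m hm]
  simp only [PySem.List.len_eq, PySem.List.foldl_append_singleton_eq_map, List.nil_append]
  rw [PySem.List.pyRange_zero_nat, List.map_map]
  apply List.map_congr_left
  intro i _
  simp only [Function.comp_apply]
  have hc : (0 : Int) < (m.length : Int) + 1 := by omega
  rw [PySem.List.pyRange_one_cons hc, List.map_cons]
  rw [if_pos rfl, zero_add]
  congr 1
  rw [PySem.List.pyRange_one,
    show ((m.length : Int) + 1 - (0 + 1)).toNat = m.length from by omega, List.map_map]
  refine Eq.trans (List.map_congr_left ?_)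
    (map_getD_range m [] (fun r => PySem.List.pyGetD r (i : Int) 0))
  intro t _
  simp only [Function.comp_apply]
  rw [if_neg (by omega), show (0 : Int) + 1 + (t : Int) - 1 = (t : Int) from by omega]
  simp [PySem.List.pyGetD_natCast]

-- Invariant of B's single pass: folding rows rs (each at least as long as acc) appends,
-- to every row of acc, that row's column of rs.
lemma fold_closed (rs : List (List Int)) : ∀ (acc : List (List Int)),
    (∀ r ∈ rs, acc.length ≤ r.length) →
    rs.foldl (fun acc fila =>
        (List.zipWith (fun destino valor => destino ++ [valor]) acc fila) ++ acc.drop fila.length)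
      acc =
    (List.range acc.length).map (fun i => acc.getD i [] ++ rs.map (fun r => r.getD i 0)) := by
  induction rs with
  | nil =>
    intro acc _
    have h := map_getD_range acc [] (id : List Int → List Int)
    simp only [id_eq] at h
    rw [List.map_id] at h
    simp only [List.foldl_nil, List.map_nil, List.append_nil]
    exact h.symm
  | cons fila rest ih =>
    intro acc hlen
    have hf : acc.length ≤ fila.length := hlen fila (by simp)
    have hdrop : acc.drop fila.length = [] := List.drop_eq_nil_of_le hf
    set acc' := List.zipWith (fun destino valor => destino ++ [valor]) acc fila with hacc'
    have hlen' : acc'.length = acc.length := by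
      simp [hacc', List.length_zipWith]; omega
    have hget : ∀ i : Nat, i < acc.length → acc'.getD i [] = acc.getD i [] ++ [fila.getD i 0] := by
      intro i hi
      have hi' : i < acc'.length := by omega
      have hif : i < fila.length := by omega
      rw [List.getD_eq_getElem _ _ hi', List.getD_eq_getElem _ _ hi,
        List.getD_eq_getElem _ _ hif]
      simp only [hacc', List.getElem_zipWith]
    rw [List.foldl_cons, hdrop, List.append_nil, ← hacc']
    rw [ih acc' (by intro r hr; rw [hlen']; exact hlen r (by simp [hr])), hlen']
    apply List.map_congr_left
    intro i hi
    rw [hget i (List.mem_range.mp hi), List.map_cons, List.append_cons, List.append_assoc]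
    simp

lemma alt_closed (m : List (List Int)) (hm : m ≠ [])
    (hlen : ∀ r ∈ m, (m.headD []).length ≤ r.length) :
    transformar_matriz_alt m =
      (List.range (m.headD []).length).map
        (fun (i : Nat) => (i : Int) :: m.map (fun r => r.getD i 0)) := by
  unfold transformar_matriz_alt
  rw [head_pyGetD m hm]
  have hlen0 : ((List.range (m.headD []).length).map (fun i : Nat => [(i : Int)])).length
      = (m.headD []).length := by simp
  rw [fold_closed m _ (by rw [hlen0]; exact hlen), hlen0]
  apply List.map_congr_left
  intro i hi
  have hi' : i < (m.headD []).length := List.mem_range.mp hi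
  rw [List.getD_eq_getElem _ _ (by simpa using hi')]
  rw [List.getElem_map, List.getElem_range]
  simp

-- ===== VERDICT (by name: the statement is the Claim_ definition above) =====
theorem transformar_matriz_spec : Claim_equal_transformar_matriz := by
  intro m _ hpre
  obtain ⟨hm, hlen⟩ := hpre
  unfold Spec_transformar_matriz
  rw [a_closed m hm, alt_closed m hm hlen]
  apply List.map_congr_left
  intro i hi
  refine congrArg ((i : Int) :: ·) ?_
  apply List.map_congr_left
  intro r hr
  rw [PySem.List.pyGetD_natCast]
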